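-- pv_equiv track=rewrite | github.com/SkaDin/Algorithms | sleight_of_hand_test.py | clever_hands
-- ===== SOURCE A (Python) =====
-- def clever_hands(press, matrix):
--     """Функция определения 'ловкости рук'."""
--     # Создаём пустой словарь и переменную-счётчик
--     incoming_nums = {}
--     count = 0
--     for i in matrix:
--     # Проходим циклом по строке и добавляем в словарь пары:
--     # ключ(элемент строки) и значение(сколько раз этот элемент встречается)
--         incoming_nums[i] = incoming_nums.setdefault(i, 0) + 1
--     for key in incoming_nums.keys():
--         # Идём по ключам словаря и проверяем условие:
--         # если значение ключа меньше или равно числу кнопок,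
--         # которые, могут нажать ребята -
--         # добавляем в переменную-счётчк 1 "балл"
--         if incoming_nums[key] <= press:
--             count += 1
--     return count
-- ===== SOURCE B (Python) =====
-- def clever_hands(press, matrix):
--     """Sort the characters, then scan consecutive runs: each run of length <= press scores 1."""
--     count = 0
--     prev = None
--     run = 0
--     for ch in sorted(matrix):
--         if prev is not None and ch == prev:
--             run += 1
--         else:
--             if prev is not None and run <= press:
--                 count += 1
--             prev = ch
--             run = 1
--     if prev is not None and run <= press:
--         count += 1
--     return count
-- ===== Notes on version B (the rewrite author's own statement) =====
-- stated objective: alternative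
-- what changed: Replaced A's frequency-dictionary build plus key scan with sorting the characters and scanning consecutive equal runs, counting each run of length <= press.
import Mathlib
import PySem

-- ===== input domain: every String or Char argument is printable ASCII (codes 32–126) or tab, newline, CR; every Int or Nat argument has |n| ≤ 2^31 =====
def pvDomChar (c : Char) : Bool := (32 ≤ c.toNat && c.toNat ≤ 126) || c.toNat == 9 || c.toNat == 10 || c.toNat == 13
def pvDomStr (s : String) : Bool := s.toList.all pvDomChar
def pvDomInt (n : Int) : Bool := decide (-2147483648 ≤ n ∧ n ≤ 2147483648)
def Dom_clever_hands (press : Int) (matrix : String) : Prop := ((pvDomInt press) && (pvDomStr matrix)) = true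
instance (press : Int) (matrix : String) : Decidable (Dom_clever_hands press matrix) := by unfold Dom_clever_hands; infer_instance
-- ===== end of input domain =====

-- B replaces A's hash-count-then-scan-keys with a sort-then-scan of consecutive runs (alternative algorithm, same result).

-- ===== PORT A =====
-- literal port: build the frequency dict, then count keys whose value is ≤ press
def clever_hands (press : Int) (matrix : String) : Int :=
  let incoming := matrix.toList.foldl (fun d i => d.insert i (d.getD i 0 + 1)) PySem.Dict.empty
  incoming.keys.foldl (fun count key => if incoming.getD key 0 ≤ press then count + 1 else count) 0

-- ===== PORT B =====
-- one step of B's run scan over the sorted characters: state = (count, prev, run)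
def bStep (press : Int) (st : Int × Option Char × Int) (ch : Char) : Int × Option Char × Int :=
  if st.2.1.isSome ∧ st.2.1 == some ch then (st.1, st.2.1, st.2.2 + 1)
  else ((if st.2.1.isSome ∧ st.2.2 ≤ press then st.1 + 1 else st.1), some ch, 1)

def clever_hands_alt (press : Int) (matrix : String) : Int :=
  let res := (PySem.List.sorted matrix.toList (fun x => x) false).foldl (bStep press) (0, none, 0)
  if res.2.1.isSome ∧ res.2.2 ≤ press then res.1 + 1 else res.1

-- ===== PRECONDITION & SPEC =====
def Spec_clever_hands (press : Int) (matrix : String) (out : Int) : Prop := out = clever_hands_alt press matrix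
instance (press : Int) (matrix : String) (out : Int) : Decidable (Spec_clever_hands press matrix out) := by unfold Spec_clever_hands; infer_instance

-- ===== CLAIM (what is proved, stated in full; the proofs are below) =====
def Claim_equal_clever_hands : Prop := ∀ (press : Int) (matrix : String), Dom_clever_hands press matrix → Spec_clever_hands press matrix (clever_hands press matrix)

-- ===== LEMMAS AND PROOFS =====

-- common spec of both programs: number of distinct values of l whose multiplicity in l is ≤ press
def gCount (press : Int) (l : List Char) : Nat :=
  (PySem.List.dedup l).countP (fun v => decide ((l.count v : Int) ≤ press))

-- B's final flush after the loop
def bFinish (press : Int) (st : Int × Option Char × Int) : Int :=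
  if st.2.1.isSome ∧ st.2.2 ≤ press then st.1 + 1 else st.1

lemma gCount_perm (press : Int) {l l' : List Char} (h : l.Perm l') :
    gCount press l = gCount press l' := by
  unfold gCount
  have hd : (PySem.List.dedup l).Perm (PySem.List.dedup l') := by
    rw [PySem.List.dedup_eq_ofList, PySem.List.dedup_eq_ofList]
    exact (List.perm_ext_iff_of_nodup (PySem.Set.nodup_ofList l) (PySem.Set.nodup_ofList l')).mpr
      (fun a => by rw [PySem.Set.mem_ofList, PySem.Set.mem_ofList]; exact h.mem_iff)
  rw [List.countP_congr (fun x _ => by rw [h.count_eq])]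
  exact hd.countP_eq _

lemma gCount_cons (press : Int) (x : Char) (xs : List Char) :
    gCount press (x :: xs)
      = (if (((x :: xs).count x : Int) ≤ press) then 1 else 0)
        + gCount press (xs.filter (fun v => !(v == x))) := by
  unfold gCount
  have hx : x ∉ xs.filter (fun v => !(v == x)) := by simp
  have hd : (PySem.List.dedup (x :: xs)).Perm (x :: PySem.List.dedup (xs.filter (fun v => !(v == x)))) := by
    rw [PySem.List.dedup_eq_ofList, PySem.List.dedup_eq_ofList]
    apply (List.perm_ext_iff_of_nodup (PySem.Set.nodup_ofList _) ?_).mpr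
    · intro a
      simp only [List.mem_cons, PySem.Set.mem_ofList, List.mem_filter, Bool.not_eq_true', beq_eq_false_iff_ne]
      constructor
      · rintro (rfl | ha)
        · exact Or.inl rfl
        · by_cases hax : a = x
          · exact Or.inl hax
          · exact Or.inr ⟨ha, hax⟩
      · rintro (rfl | ⟨ha, _⟩)
        · exact Or.inl rfl
        · exact Or.inr ha
    · exact List.nodup_cons.mpr ⟨by simp, PySem.Set.nodup_ofList _⟩
  rw [hd.countP_eq]
  rw [List.countP_cons]
  have hcong : ∀ v ∈ PySem.List.dedup (xs.filter (fun v => !(v == x))),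
      (decide (((x :: xs).count v : Int) ≤ press))
        = (decide (((xs.filter (fun v => !(v == x))).count v : Int) ≤ press)) := by
    intro v hv
    have hvx : ¬ (v = x) := by
      intro h; subst h
      simp [PySem.List.dedup_eq_ofList, PySem.Set.mem_ofList] at hv
    rw [List.count_filter (by simpa using hvx)]
    simp [Ne.symm hvx]
  rw [List.countP_congr (fun v hv => by rw [hcong v hv])]
  simp only [decide_eq_true_eq]
  omega

lemma scan_run (press : Int) :
    ∀ (t : List Char) (c r : Int) (p : Char),
      t.Pairwise (· ≤ ·) → (∀ y ∈ t, p ≤ y) →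
      bFinish press (t.foldl (bStep press) (c, some p, r))
        = c + (if (r + (t.count p : Int)) ≤ press then 1 else 0)
            + (gCount press (t.filter (fun v => !(v == p))) : Int) := by
  intro t
  induction t with
  | nil =>
    intro c r p _ _
    show (if (some p).isSome ∧ r ≤ press then c + 1 else c) = _
    have hg : gCount press (List.filter (fun v => !(v == p)) []) = 0 := rfl
    simp only [hg, Option.isSome_some, true_and, List.count_nil, add_zero, CharP.cast_eq_zero]
    split <;> omega
  | cons x xs ih =>
    intro c r p hpw hle
    have hx : ∀ y ∈ xs, x ≤ y := fun y hy => (List.pairwise_cons.mp hpw).1 y hy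
    have hpw' : xs.Pairwise (· ≤ ·) := (List.pairwise_cons.mp hpw).2
    have hpx : p ≤ x := hle x (List.mem_cons_self ..)
    by_cases hxp : x = p
    · subst hxp
      have hstep : bStep press (c, some x, r) x = (c, some x, r + 1) := by
        simp [bStep]
      rw [List.foldl_cons, hstep, ih c (r + 1) x hpw' hx]
      have hc : r + 1 + (xs.count x : Int) = r + ((x :: xs).count x : Int) := by
        simp [List.count_cons_self]; ring
      rw [hc]
      simp [List.filter]
    · have hpx' : p < x := lt_of_le_of_ne hpx (fun h => hxp h.symm)
      have hpmem : p ∉ x :: xs := by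
        intro hm
        rcases List.mem_cons.mp hm with h | h
        · exact hxp h.symm
        · exact absurd (hx p h) (not_le.mpr hpx')
      have hbeq : (some p == some x) = false := by
        simp [Ne.symm hxp]
      have hstep : bStep press (c, some p, r) x
          = ((if r ≤ press then c + 1 else c), some x, 1) := by
        simp [bStep, hbeq]
      rw [List.foldl_cons, hstep, ih _ 1 x hpw' hx]
      have hcount : (x :: xs).count p = 0 := List.count_eq_zero_of_not_mem hpmem
      have hfilter : (x :: xs).filter (fun v => !(v == p)) = x :: xs := by
        rw [List.filter_eq_self]
        intro a ha
        simp only [Bool.not_eq_eq_eq_not, Bool.not_true, beq_eq_false_iff_ne]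
        intro h; exact hpmem (h ▸ ha)
      rw [hcount, hfilter, gCount_cons press x xs]
      have h1 : ((x :: xs).count x : Int) = 1 + (xs.count x : Int) := by
        simp [List.count_cons_self]; ring
      rw [h1]
      push_cast
      simp only [add_zero]
      split <;> ring

lemma a_eq_gCount (press : Int) (matrix : String) :
    clever_hands press matrix = (gCount press matrix.toList : Int) := by
  unfold clever_hands gCount
  simp only [PySem.Dict.foldl_insert_getD_add_one_eq_counter, PySem.Dict.keys_counter,
    PySem.Dict.getD_counter, PySem.List.dedup_eq_ofList]
  rw [PySem.List.foldl_ite_add_one (p := fun key => ((matrix.toList.count key : Int)) ≤ press)]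
  simp

lemma b_eq_gCount (press : Int) (matrix : String) :
    clever_hands_alt press matrix = (gCount press matrix.toList : Int) := by
  unfold clever_hands_alt
  have hb : ∀ st, (if st.2.1.isSome ∧ st.2.2 ≤ press then st.1 + 1 else st.1) = bFinish press st :=
    fun _ => rfl
  rw [hb]
  have hperm := PySem.List.sorted_perm matrix.toList (fun x => x) false
  rw [gCount_perm press hperm.symm]
  cases hs : PySem.List.sorted matrix.toList (fun x => x) false with
  | nil => simp [bFinish, gCount]
  | cons x xs =>
    have hpw : (x :: xs).Pairwise (· ≤ ·) := by
      have := PySem.List.sorted_pairwise matrix.toList (fun x => x)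
      rw [hs] at this; exact this
    have hstep : bStep press (0, none, 0) x = (0, some x, 1) := by
      simp [bStep]
    rw [List.foldl_cons, hstep,
      scan_run press xs 0 1 x (List.pairwise_cons.mp hpw).2 (List.pairwise_cons.mp hpw).1]
    rw [gCount_cons press x xs]
    have h1 : ((x :: xs).count x : Int) = 1 + (xs.count x : Int) := by
      simp [List.count_cons_self]; ring
    rw [h1]
    push_cast
    ring

-- ===== VERDICT (by name: the statement is the Claim_ definition above) =====
theorem clever_hands_spec : Claim_equal_clever_hands := by
  intro press matrix _
  unfold Spec_clever_hands
  rw [a_eq_gCount, b_eq_gCount]
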